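/- GENERATED by mk_final_copies.py from the proof of the farm's unit `start_decoder.6` (farm:start_decoder.6.2: Proof.lean) as the
   re-elaboration sweep compiled it — do not edit. -/
import Vorbis.Spec.Worked.start_decoder_6_Lemmas
import Vorbis.Spec.Units.start_decoder_6

open X86 X86.User Asan Vorbis Vorbis.Spec Vorbis.Spec.StartDecoder

/-- **Unit `start_decoder.6`** (0x113efe … 0x114009, stb_vorbis_fixed.c:3682 – 3692, 3700: the vendor bytes, the terminator,
`comment_list_length = get32_packet(f)` + FIX 2, the allocation of `comment_list` + FIX 12's zero fill, `i = 0`): the composition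
`seg6` of Lemmas.lean (loop 3682 by `ReachVia.loop`; the exit path cut at the return of `setup_malloc`), given the callees'
contracts of the statement. -/
theorem Vorbis.Spec.Worked.start_decoder_6_ok : Vorbis.Spec.start_decoder_6.Statement := by
  intro Lay hLay μ hμ u₀ hcode h_get8_packet h_asan_load8_noabort h_asan_store1_noabort h_get32_packet
    h_asan_store4_noabort h_asan_store8_noabort h_error h_setup_malloc h_asan_load4_noabort h_memset
  exact Vorbis.Spec.start_decoder_6.seg6 Lay hLay μ hμ u₀ hcode h_get8_packet h_asan_load8_noabort
    h_asan_store1_noabort h_get32_packet h_asan_store4_noabort h_asan_store8_noabort h_error h_setup_malloc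
    h_asan_load4_noabort h_memset
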